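-- pv_equiv track=rewrite | github.com/AustinJunyuLi/bids_pipeline | archive/pipeline/stage4_assembly.py | _row_flag_names
-- ===== SOURCE A (Python) =====
-- def _row_flag_names(rows: list[dict[str, str]]) -> set[str]:
--     """Return review-status flags implied by row-level reviewer flags."""
--
--     flags: set[str] = set()
--     if any(row.get("flag_approximate_date") == "true" for row in rows):
--         flags.add("approximate_date")
--     if any(row.get("flag_missing_nda") == "true" for row in rows):
--         flags.add("missing_nda")
--     if any(row.get("flag_unresolved_lifecycle") == "true" for row in rows):
--         flags.add("unresolved_lifecycle")
--     if any(row.get("flag_anonymous_mapping") == "true" for row in rows):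
--         flags.add("anonymous_mapping")
--     return flags
-- ===== SOURCE B (Python) =====
-- _REVIEW_FLAGS = ("approximate_date", "missing_nda", "unresolved_lifecycle", "anonymous_mapping")
--
--
-- def _row_flag_names(rows):
--     """Return review-status flags implied by row-level reviewer flags."""
--     seen = set()
--     for row in rows:
--         for key, value in row.items():
--             if value == "true" and key.startswith("flag_"):
--                 seen.add(key[len("flag_"):])
--     return set(_REVIEW_FLAGS) & seen
-- ===== Notes on version B (the rewrite author's own statement) =====
-- stated objective: alternative
-- what changed: Instead of A's four per-column any-scans that look each fixed key up in every row, B never calls row.get: it makes one pass over the key/value items the rows actually contain, strips the 'flag_' prefix off every key whose value is 'true', and intersects the collected names with the known review-flag set.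
import Mathlib
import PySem

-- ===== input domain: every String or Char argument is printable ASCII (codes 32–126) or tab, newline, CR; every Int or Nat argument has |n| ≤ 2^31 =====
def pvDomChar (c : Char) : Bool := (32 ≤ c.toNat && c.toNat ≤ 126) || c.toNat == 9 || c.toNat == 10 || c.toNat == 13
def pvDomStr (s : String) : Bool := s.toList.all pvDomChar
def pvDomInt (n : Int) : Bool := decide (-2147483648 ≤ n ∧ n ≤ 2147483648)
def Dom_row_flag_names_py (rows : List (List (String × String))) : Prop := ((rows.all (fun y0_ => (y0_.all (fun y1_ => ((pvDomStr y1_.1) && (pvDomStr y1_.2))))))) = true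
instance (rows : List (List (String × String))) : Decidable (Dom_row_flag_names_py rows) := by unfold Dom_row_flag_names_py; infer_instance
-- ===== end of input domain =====

-- B replaces A's four fixed-column any-scans over the rows by one pass over the key/value items the rows contain (prefix-strip the keys, then intersect with the known flag names); objective: alternative decomposition, equivalence of the RETURN value.


-- ===== PORT A =====
def row_flag_names_py (rows : List (List (String × String))) : List String :=
  let flags : PySem.Set String := PySem.Set.empty
  let flags := if rows.any (fun row => (PySem.Dict.ofList row).get? "flag_approximate_date" == some "true")
               then PySem.Set.add flags "approximate_date" else flags
  let flags := if rows.any (fun row => (PySem.Dict.ofList row).get? "flag_missing_nda" == some "true")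
               then PySem.Set.add flags "missing_nda" else flags
  let flags := if rows.any (fun row => (PySem.Dict.ofList row).get? "flag_unresolved_lifecycle" == some "true")
               then PySem.Set.add flags "unresolved_lifecycle" else flags
  let flags := if rows.any (fun row => (PySem.Dict.ofList row).get? "flag_anonymous_mapping" == some "true")
               then PySem.Set.add flags "anonymous_mapping" else flags
  flags

-- ===== PORT B =====
def pvReviewFlags : List String :=
  ["approximate_date", "missing_nda", "unresolved_lifecycle", "anonymous_mapping"]

-- the 'seen' set Source B accumulates: one pass over every row's items, prefix-stripping the keys
def pvSeen (rows : List (List (String × String))) : PySem.Set String :=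
  rows.foldl (fun seen row =>
    (PySem.Dict.ofList row).items.foldl (fun seen kv =>
      if kv.2 == "true" && PySem.Str.startswith kv.1 "flag_" then
        PySem.Set.add seen (PySem.Str.slice kv.1 (some 5) none)   -- key[len("flag_"):]
      else seen) seen)
    PySem.Set.empty

def row_flag_names_py_alt (rows : List (List (String × String))) : List String :=
  PySem.Set.inter (PySem.Set.ofList pvReviewFlags) (pvSeen rows)

-- ===== PRECONDITION & SPEC =====
def Spec_row_flag_names_py (rows : List (List (String × String))) (out : List String) : Prop := out = row_flag_names_py_alt rows
instance (rows : List (List (String × String))) (out : List String) : Decidable (Spec_row_flag_names_py rows out) := by unfold Spec_row_flag_names_py; infer_instance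

-- ===== CLAIM (what is proved, stated in full; the proofs are below) =====
def Claim_equal_row_flag_names_py : Prop := ∀ (rows : List (List (String × String))), Dom_row_flag_names_py rows → Spec_row_flag_names_py rows (row_flag_names_py rows)

-- ===== LEMMAS AND PROOFS =====

-- membership in the inner (per-row) fold of B
theorem pv_mem_inner (items : List (String × String)) (s : PySem.Set String) (x : String) :
    x ∈ items.foldl (fun seen kv =>
        if kv.2 == "true" && PySem.Str.startswith kv.1 "flag_" then
          PySem.Set.add seen (PySem.Str.slice kv.1 (some 5) none) else seen) s
      ↔ x ∈ s ∨ ∃ kv ∈ items, (kv.2 == "true" && PySem.Str.startswith kv.1 "flag_") = true ∧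
          PySem.Str.slice kv.1 (some 5) none = x := by
  induction items generalizing s with
  | nil => simp
  | cons kv rest ih =>
      simp only [List.foldl, ih, List.mem_cons]
      by_cases hc : (kv.2 == "true" && PySem.Str.startswith kv.1 "flag_") = true
      · simp only [hc, if_true, PySem.Set.mem_add]
        constructor
        · rintro ((h1 | h1) | ⟨q, hq, hcq, hx⟩)
          · exact Or.inl h1
          · exact Or.inr ⟨kv, Or.inl rfl, hc, h1.symm⟩
          · exact Or.inr ⟨q, Or.inr hq, hcq, hx⟩
        · rintro (h1 | ⟨q, (rfl | hq), hcq, hx⟩)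
          · exact Or.inl (Or.inl h1)
          · exact Or.inl (Or.inr hx.symm)
          · exact Or.inr ⟨q, hq, hcq, hx⟩
      · simp only [hc]
        constructor
        · rintro (h1 | ⟨q, hq, hcq, hx⟩)
          · exact Or.inl h1
          · exact Or.inr ⟨q, Or.inr hq, hcq, hx⟩
        · rintro (h1 | ⟨q, (rfl | hq), hcq, hx⟩)
          · exact Or.inl h1
          · exact absurd hcq hc
          · exact Or.inr ⟨q, hq, hcq, hx⟩

-- membership in B's seen-set
theorem pv_mem_seen (rows : List (List (String × String))) (x : String) :
    x ∈ pvSeen rows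
      ↔ ∃ row ∈ rows, ∃ kv ∈ (PySem.Dict.ofList row).items,
          (kv.2 == "true" && PySem.Str.startswith kv.1 "flag_") = true ∧
          PySem.Str.slice kv.1 (some 5) none = x := by
  unfold pvSeen
  have gen : ∀ (s : PySem.Set String),
      x ∈ rows.foldl (fun seen row =>
          (PySem.Dict.ofList row).items.foldl (fun seen kv =>
            if kv.2 == "true" && PySem.Str.startswith kv.1 "flag_" then
              PySem.Set.add seen (PySem.Str.slice kv.1 (some 5) none) else seen) seen) s
        ↔ x ∈ s ∨ ∃ row ∈ rows, ∃ kv ∈ (PySem.Dict.ofList row).items,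
            (kv.2 == "true" && PySem.Str.startswith kv.1 "flag_") = true ∧
            PySem.Str.slice kv.1 (some 5) none = x := by
    induction rows with
    | nil => simp
    | cons row rest ih =>
        intro s
        simp only [List.foldl, List.mem_cons, ih, pv_mem_inner]
        constructor
        · rintro ((h1 | ⟨kv, hkv, hc, hx⟩) | ⟨r, hr, hrest⟩)
          · exact Or.inl h1
          · exact Or.inr ⟨row, Or.inl rfl, kv, hkv, hc, hx⟩
          · exact Or.inr ⟨r, Or.inr hr, hrest⟩
        · rintro (h1 | ⟨r, (rfl | hr), hrest⟩)
          · exact Or.inl (Or.inl h1)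
          · exact Or.inl (Or.inr hrest)
          · exact Or.inr ⟨r, hr, hrest⟩
  rw [gen PySem.Set.empty]
  simp [PySem.Set.empty]

-- a key decomposes as "flag_" ++ f exactly when it startswith "flag_" and its 5-drop is f
theorem pv_key_decomp (s f : String) :
    (PySem.Str.startswith s "flag_" = true ∧ PySem.Str.slice s (some 5) none = f)
      ↔ s.toList = "flag_".toList ++ f.toList := by
  have hslice : (PySem.Str.slice s (some 5) none).toList = s.toList.drop 5 := by
    simp [PySem.Str.slice]
    exact_mod_cast PySem.List.slice_from_natCast s.toList 5
  constructor
  · rintro ⟨hpre, hdrop⟩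
    rw [PySem.Str.startswith_eq, PySem.Chars.startswith_iff] at hpre
    obtain ⟨t, ht⟩ := hpre
    have hlen : ("flag_".toList).length = 5 := by decide
    have : s.toList.drop 5 = t := by rw [← ht, ← hlen, List.drop_left]
    rw [← ht, this.symm, hslice.symm, hdrop]
  · intro h
    constructor
    · rw [PySem.Str.startswith_eq, PySem.Chars.startswith_iff, h]
      exact List.prefix_append _ _
    · apply String.toList_inj.mp
      rw [hslice, h]
      rfl

-- B's seen-set contains the flag name f iff some row's dict maps "flag_" ++ f to "true"
theorem pv_contains_seen (rows : List (List (String × String))) (k f : String)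
    (hk : k.toList = "flag_".toList ++ f.toList) :
    PySem.Set.contains (pvSeen rows) f
      = rows.any (fun row => (PySem.Dict.ofList row).get? k == some "true") := by
  have key : PySem.Set.contains (pvSeen rows) f = true
      ↔ (rows.any fun row => (PySem.Dict.ofList row).get? k == some "true") = true := by
    rw [PySem.Set.contains_iff, pv_mem_seen, List.any_eq_true]
    constructor
    · rintro ⟨r, hr, kv, hkv, hc, hx⟩
      refine ⟨r, hr, ?_⟩
      simp only [Bool.and_eq_true, beq_iff_eq] at hc
      have hkey : kv.1 = k := by
        apply String.toList_inj.mp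
        rw [hk, ← ((pv_key_decomp kv.1 f).mp ⟨hc.2, hx⟩)]
      have hget : (PySem.Dict.ofList r).get? kv.1 = some kv.2 :=
        ((PySem.Dict.get?_eq_some_iff_mem_items _ _ _ (PySem.Dict.nodup_keys_ofList r)).mpr hkv)
      rw [← hkey, hget, hc.1]
      simp
    · rintro ⟨r, hr, hc⟩
      simp only [beq_iff_eq] at hc
      have hmem : (k, "true") ∈ (PySem.Dict.ofList r).items :=
        (PySem.Dict.get?_eq_some_iff_mem_items _ _ _ (PySem.Dict.nodup_keys_ofList r)).mp hc
      have hd := (pv_key_decomp k f).mpr hk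
      have hcond : (("true" : String) == "true" && PySem.Str.startswith k "flag_") = true := by
        rw [hd.1]; simp
      exact ⟨r, hr, (k, "true"), hmem, hcond, hd.2⟩
  rcases Bool.eq_false_or_eq_true (rows.any fun row => (PySem.Dict.ofList row).get? k == some "true") with h | h <;>
    rw [h] <;> rw [h] at key <;>
    first
      | exact key.mpr rfl
      | · simp only [Bool.false_eq_true, iff_false] at key
          exact Bool.eq_false_iff.mpr key

-- ===== VERDICT (by name: the statement is the Claim_ definition above) =====
theorem row_flag_names_py_spec : Claim_equal_row_flag_names_py := by
  intro rows _
  unfold Spec_row_flag_names_py row_flag_names_py row_flag_names_py_alt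
  have h1 := pv_contains_seen rows "flag_approximate_date" "approximate_date" (by decide)
  have h2 := pv_contains_seen rows "flag_missing_nda" "missing_nda" (by decide)
  have h3 := pv_contains_seen rows "flag_unresolved_lifecycle" "unresolved_lifecycle" (by decide)
  have h4 := pv_contains_seen rows "flag_anonymous_mapping" "anonymous_mapping" (by decide)
  have hofl : PySem.Set.ofList pvReviewFlags
      = ["approximate_date", "missing_nda", "unresolved_lifecycle", "anonymous_mapping"] := by decide
  rw [hofl]
  simp only [PySem.Set.inter, List.filter_cons, List.filter_nil]
  rw [h1, h2, h3, h4]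
  rcases Bool.eq_false_or_eq_true (rows.any fun row => (PySem.Dict.ofList row).get? "flag_approximate_date" == some "true") with hc1 | hc1 <;>
  rcases Bool.eq_false_or_eq_true (rows.any fun row => (PySem.Dict.ofList row).get? "flag_missing_nda" == some "true") with hc2 | hc2 <;>
  rcases Bool.eq_false_or_eq_true (rows.any fun row => (PySem.Dict.ofList row).get? "flag_unresolved_lifecycle" == some "true") with hc3 | hc3 <;>
  rcases Bool.eq_false_or_eq_true (rows.any fun row => (PySem.Dict.ofList row).get? "flag_anonymous_mapping" == some "true") with hc4 | hc4 <;>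
  simp [hc1, hc2, hc3, hc4, PySem.Set.add, PySem.Set.empty]
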